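-- pv_equiv track=rewrite | github.com/FCP-INDI/C-PAC | CPAC/pipeline/cpac_ga_model_generator.py | parse_out_covariates
-- ===== SOURCE A (Python) =====
-- def parse_out_covariates(design_formula):
--
--     patsy_ops = ["~", "+", "-", "*", "/", ":", "**", ")", "("]
--
--     for op in patsy_ops:
--         if op in design_formula:
--             design_formula = design_formula.replace(op, " ")
--
--     words = design_formula.split(" ")
--
--     covariates = [x for x in words if x != ""]
--
--     return covariates
-- ===== SOURCE B (Python) =====
-- def parse_out_covariates(design_formula):
--     seps = "~+-*/:() "
--     covariates = []
--     cur = []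
--     for ch in design_formula:
--         if ch in seps:
--             if cur:
--                 covariates.append("".join(cur))
--                 cur = []
--         else:
--             cur.append(ch)
--     if cur:
--         covariates.append("".join(cur))
--     return covariates
-- ===== Notes on version B (the rewrite author's own statement) =====
-- stated objective: alternative
-- what changed: B tokenizes in one left-to-right scan, accumulating the current token and flushing it at each separator character, instead of A's nine replace passes followed by split-on-space and a filter of empty pieces.
import Mathlib
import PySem

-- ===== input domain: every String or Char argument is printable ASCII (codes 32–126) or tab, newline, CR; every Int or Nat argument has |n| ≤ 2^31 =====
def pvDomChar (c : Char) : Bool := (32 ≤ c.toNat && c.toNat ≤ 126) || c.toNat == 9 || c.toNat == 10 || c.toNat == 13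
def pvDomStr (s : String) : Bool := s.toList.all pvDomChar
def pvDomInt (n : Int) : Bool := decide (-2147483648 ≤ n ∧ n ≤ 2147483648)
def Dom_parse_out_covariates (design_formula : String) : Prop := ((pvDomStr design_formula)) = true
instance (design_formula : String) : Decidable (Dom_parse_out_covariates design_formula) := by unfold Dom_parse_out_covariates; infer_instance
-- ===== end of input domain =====

-- B replaces A's nine replace-passes + split + filter by one left-to-right scan flushing the
-- current token at each separator (objective: alternative single-pass algorithm, same result).

-- ===== PORT A =====
-- patsy_ops = ["~", "+", "-", "*", "/", ":", "**", ")", "("]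
def pycPatsyOps : List String := ["~", "+", "-", "*", "/", ":", "**", ")", "("]

-- one iteration of A's for-loop: if op in design_formula: design_formula = design_formula.replace(op, " ")
def pycStep (df : String) (op : String) : String :=
  if PySem.Str.isIn op df then PySem.Str.replace df op " " else df

def parse_out_covariates (design_formula : String) : List String :=
  let df := pycPatsyOps.foldl pycStep design_formula
  -- words = design_formula.split(" ") — sep " " ≠ "" so split? is always `some`; getD [] is never hit
  let words := (PySem.Str.split? df " ").getD []
  -- covariates = [x for x in words if x != ""]
  words.filter (fun x => decide (x ≠ ""))

-- ===== PORT B =====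
-- seps = "~+-*/:() "
def altIsSep (c : Char) : Bool :=
  c = '~' || c = '+' || c = '-' || c = '*' || c = '/' || c = ':' || c = '(' || c = ')' || c = ' '

-- Source B's loop over the characters, state = (covariates, cur); the trailing `if cur:` flush is the base case
def altGo : List Char → List String → List Char → List String
  | [], covariates, cur => if cur.isEmpty then covariates else covariates ++ [String.ofList cur]
  | ch :: rest, covariates, cur =>
    if altIsSep ch then
      (if cur.isEmpty then altGo rest covariates [] else altGo rest (covariates ++ [String.ofList cur]) [])
    else altGo rest covariates (cur ++ [ch])

def parse_out_covariates_alt (design_formula : String) : List String :=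
  altGo design_formula.toList [] []

-- ===== PRECONDITION & SPEC =====
def Spec_parse_out_covariates (design_formula : String) (out : List String) : Prop := out = parse_out_covariates_alt design_formula
instance (design_formula : String) (out : List String) : Decidable (Spec_parse_out_covariates design_formula out) := by unfold Spec_parse_out_covariates; infer_instance

-- ===== CLAIM (what is proved, stated in full; the proofs are below) =====
def Claim_equal_parse_out_covariates : Prop := ∀ (design_formula : String), Dom_parse_out_covariates design_formula → Spec_parse_out_covariates design_formula (parse_out_covariates design_formula)

-- ===== LEMMAS AND PROOFS =====

-- character substitution performed by one single-char replace pass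
def pvRepl (c x : Char) : Char := if x = c then ' ' else x

theorem pvReplace_go_single (c : Char) (l acc : List Char) (fuel : Nat) (h : l.length ≤ fuel) :
    PySem.Chars.replace.go [c] [' '] fuel l acc = acc.reverse ++ l.map (pvRepl c) := by
  induction l generalizing acc fuel with
  | nil => rw [PySem.Chars.replace.go.eq_def]; cases fuel <;> simp
  | cons x t ih =>
    cases fuel with
    | zero => simp at h
    | succ f =>
      rw [PySem.Chars.replace.go.eq_def]
      simp only [List.isPrefixOf, List.length_cons] at h ⊢
      by_cases hx : x = c
      · subst hx
        rw [if_pos (by simp)]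
        have := ih (' ' :: acc) f (by omega)
        simpa [pvRepl] using this
      · rw [if_neg (by simp [Ne.symm hx])]
        rw [ih (x :: acc) f (by omega)]
        simp [pvRepl, hx]

theorem pvReplace_single (c : Char) (l : List Char) :
    PySem.Chars.replace l [c] [' '] = l.map (pvRepl c) := by
  rw [PySem.Chars.replace]
  simp [pvReplace_go_single c l [] l.length le_rfl]

theorem pvMap_repl_not_mem {c : Char} {l : List Char} (h : c ∉ l) : l.map (pvRepl c) = l := by
  induction l with
  | nil => rfl
  | cons x t ih =>
    simp only [List.mem_cons, not_or] at h
    simp [pvRepl, Ne.symm h.1, ih h.2]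

-- one iteration of A's loop for a single-character op, at the char-list level
theorem pvStep_toList (df : String) (c : Char) (op : String) (hop : op.toList = [c]) :
    (pycStep df op).toList = df.toList.map (pvRepl c) := by
  unfold pycStep
  simp only [PySem.Str.isIn, hop]
  by_cases h : PySem.Chars.isIn [c] df.toList = true
  · rw [if_pos h, PySem.Str.toList_replace, hop,
      show (" " : String).toList = [' '] from rfl, pvReplace_single]
  · rw [if_neg h]
    have hni : c ∉ df.toList := fun hm =>
      h ((PySem.Chars.isIn_iff_infix _ _).mpr ((List.singleton_infix_iff c _).mpr hm))
    exact (pvMap_repl_not_mem hni).symm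

-- after '*' has been replaced, "**" no longer occurs, so A's "**" pass is the identity
theorem pvStep_starstar (df : String) (h : '*' ∉ df.toList) : pycStep df "**" = df := by
  unfold pycStep
  have : PySem.Str.isIn "**" df = false := by
    rw [PySem.Str.isIn]
    rw [PySem.Chars.isIn_eq_false_iff]
    intro hinf
    exact h (hinf.subset (by decide))
  rw [PySem.Str.isIn] at this ⊢
  simp only [this, Bool.false_eq_true, if_false]

-- the total substitution A's nine passes perform
theorem pvRepl_chain (x : Char) :
    (pvRepl '(' ∘ pvRepl ')' ∘ (pvRepl ':' ∘ pvRepl '/' ∘ pvRepl '*' ∘ pvRepl '-' ∘ pvRepl '+' ∘ pvRepl '~')) x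
      = if altIsSep x then ' ' else x := by
  by_cases h : altIsSep x = true
  · rw [if_pos h]
    simp only [altIsSep, Bool.or_eq_true, decide_eq_true_eq] at h
    rcases h with ((((((((h|h)|h)|h)|h)|h)|h)|h)|h) <;> subst h <;> rfl
  · rw [if_neg h]
    simp only [altIsSep, Bool.or_eq_true, decide_eq_true_eq, not_or] at h
    obtain ⟨⟨⟨⟨⟨⟨⟨⟨h1, h2⟩, h3⟩, h4⟩, h5⟩, h6⟩, h7⟩, h8⟩, h9⟩ := h
    simp [Function.comp, pvRepl, h1, h2, h3, h4, h5, h6, h7, h8]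

set_option maxHeartbeats 1600000 in
theorem pvFold_ops (df : String) :
    (pycPatsyOps.foldl pycStep df).toList = df.toList.map (fun c => if altIsSep c then ' ' else c) := by
  simp only [pycPatsyOps, List.foldl_cons, List.foldl_nil]
  set d1 := pycStep df "~" with h1
  set d2 := pycStep d1 "+" with h2
  set d3 := pycStep d2 "-" with h3
  set d4 := pycStep d3 "*" with h4
  set d5 := pycStep d4 "/" with h5
  set d6 := pycStep d5 ":" with h6
  have e1 : d1.toList = df.toList.map (pvRepl '~') := pvStep_toList df '~' "~" rfl
  have e2 : d2.toList = df.toList.map (pvRepl '+' ∘ pvRepl '~') := by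
    rw [h2, pvStep_toList d1 '+' "+" rfl, e1, List.map_map]
  have e3 : d3.toList = df.toList.map (pvRepl '-' ∘ pvRepl '+' ∘ pvRepl '~') := by
    rw [h3, pvStep_toList d2 '-' "-" rfl, e2, List.map_map]
  have e4 : d4.toList = df.toList.map (pvRepl '*' ∘ pvRepl '-' ∘ pvRepl '+' ∘ pvRepl '~') := by
    rw [h4, pvStep_toList d3 '*' "*" rfl, e3, List.map_map]
  have e5 : d5.toList = df.toList.map (pvRepl '/' ∘ pvRepl '*' ∘ pvRepl '-' ∘ pvRepl '+' ∘ pvRepl '~') := by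
    rw [h5, pvStep_toList d4 '/' "/" rfl, e4, List.map_map]
  have e6 : d6.toList = df.toList.map (pvRepl ':' ∘ pvRepl '/' ∘ pvRepl '*' ∘ pvRepl '-' ∘ pvRepl '+' ∘ pvRepl '~') := by
    rw [h6, pvStep_toList d5 ':' ":" rfl, e5, List.map_map]
  have hstar : '*' ∉ d6.toList := by
    rw [e6]
    intro hm
    rcases List.mem_map.mp hm with ⟨x, _, hx⟩
    revert hx
    simp only [Function.comp, pvRepl]
    split_ifs <;> simp_all
  rw [pvStep_starstar d6 hstar]
  rw [pvStep_toList _ '(' "(" rfl, pvStep_toList d6 ')' ")" rfl, e6, List.map_map, List.map_map]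
  apply List.map_congr_left
  intro x _
  have := pvRepl_chain x
  simp only [Function.comp] at this ⊢
  exact this

-- String.ofList is "" exactly on []
theorem pvOfList_ne_empty (cs : List Char) : (decide (String.ofList cs ≠ "")) = !cs.isEmpty := by
  cases cs with
  | nil => simp
  | cons c t =>
    simp only [List.isEmpty_cons, Bool.not_false, decide_eq_true_eq]
    intro h
    have := congrArg String.toList h
    simp at this

-- the split-then-filter of A, run on a string whose separators are all ' ', is B's scan
theorem pvSplit_go_filter (g : Char → Char) (hg : ∀ c, g c = if altIsSep c then ' ' else c)
    (cs : List Char) (cur : List Char) (acc : List (List Char)) (fuel : Nat) (h : cs.length ≤ fuel) :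
    ((PySem.Chars.splitOn.go [' '] fuel (cs.map g) cur acc).filter (fun x => decide (x ≠ []))).map String.ofList
      = altGo cs ((acc.reverse.filter (fun x => decide (x ≠ []))).map String.ofList) cur.reverse := by
  induction cs generalizing cur acc fuel with
  | nil =>
    rw [PySem.Chars.splitOn.go.eq_def]
    cases fuel <;>
      · simp only [List.map_nil, List.reverse_cons, List.append_nil, List.filter_append, List.map_append, altGo]
        by_cases hcur : cur = [] <;> simp [hcur]
  | cons c rest ih =>
    cases fuel with
    | zero => simp at h
    | succ f =>
      rw [PySem.Chars.splitOn.go.eq_def]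
      simp only [List.map_cons, List.length_cons] at h ⊢
      by_cases hsep : altIsSep c
      · have hgc : g c = ' ' := by rw [hg c]; simp [hsep]
        have hpre : [' '].isPrefixOf (g c :: rest.map g) = true := by simp [List.isPrefixOf, hgc]
        rw [hpre]
        simp only [if_true, List.length_nil, List.drop_succ_cons, List.drop_zero]
        rw [ih [] (cur.reverse :: acc) f (by omega)]
        simp only [List.reverse_cons, List.filter_append, List.map_append, List.reverse_nil, altGo, hsep, if_true]
        by_cases hcur : cur = [] <;> simp [hcur]
      · have hgc : g c = c := by rw [hg c]; simp [hsep]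
        have hnsp : c ≠ ' ' := by intro he; rw [he] at hsep; simp [altIsSep] at hsep
        have hpre : [' '].isPrefixOf (g c :: rest.map g) = false := by
          simp [List.isPrefixOf, hgc, Ne.symm hnsp]
        rw [hpre]
        simp only [Bool.false_eq_true, if_false, altGo, hsep, Bool.false_eq_true, if_false]
        have := ih (c :: cur) acc f (by omega)
        simp only [List.reverse_cons] at this
        rw [hgc]
        exact this

-- ===== VERDICT (by name: the statement is the Claim_ definition above) =====
theorem parse_out_covariates_spec : Claim_equal_parse_out_covariates := by
  intro s _
  unfold Spec_parse_out_covariates parse_out_covariates parse_out_covariates_alt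
  show ((PySem.Str.split? (pycPatsyOps.foldl pycStep s) " ").getD []).filter (fun x => decide (x ≠ "")) = altGo s.toList [] []
  have hfold := pvFold_ops s
  set df := pycPatsyOps.foldl pycStep s with hdf
  have hsplit : PySem.Str.split? df " " = some ((PySem.Chars.splitOn df.toList [' ']).map String.ofList) := by
    rw [PySem.Str.split?, PySem.Chars.split?]
    simp [show (" " : String).toList = [' '] from rfl]
  rw [hsplit]
  simp only [Option.getD_some]
  have hfl : ((PySem.Chars.splitOn df.toList [' ']).map String.ofList).filter (fun x => decide (x ≠ ""))
      = ((PySem.Chars.splitOn df.toList [' ']).filter (fun x => decide (x ≠ []))).map String.ofList := by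
    have hfun : ((fun x => decide (x ≠ "")) ∘ String.ofList) = (fun cs : List Char => decide (cs ≠ [])) := by
      funext cs
      simp only [Function.comp, pvOfList_ne_empty]
      cases cs <;> simp
    rw [List.filter_map, hfun]
  rw [hfl, PySem.Chars.splitOn]
  rw [hfold]
  have := pvSplit_go_filter (fun c => if altIsSep c then ' ' else c) (fun _ => rfl) s.toList [] []
      ((s.toList.map fun c => if altIsSep c then ' ' else c).length + 1)
      (by simp)
  simpa using this
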